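-- pv_equiv track=rewrite | github.com/mizuP0905/SoftQuantum | SoftQuantum/quantum_simulator_global.py | _tokenize_program
-- ===== SOURCE A (Python) =====
-- from typing import Dict, Iterable, List, Optional, Sequence, Tuple
--
-- def _strip_comments(text: str) -> str:
--     out: List[str] = []
--     i = 0
--     in_string = False
--     quote = ""
--     while i < len(text):
--         ch = text[i]
--         if in_string:
--             out.append(ch)
--             if ch == "\\" and i + 1 < len(text):
--                 out.append(text[i + 1])
--                 i += 2
--                 continue
--             if ch == quote:
--                 in_string = False
--             i += 1
--             continue
--
--         if ch in ("'", '"'):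
--             in_string = True
--             quote = ch
--             out.append(ch)
--             i += 1
--             continue
--
--         if text.startswith("//", i):
--             while i < len(text) and text[i] not in "\r\n":
--                 i += 1
--             continue
--
--         if ch == "#":
--             while i < len(text) and text[i] not in "\r\n":
--                 i += 1
--             continue
--
--         if text.startswith("/*", i):
--             end = text.find("*/", i + 2)
--             if end == -1:
--                 break
--             i = end + 2
--             continue
--
--         out.append(ch)
--         i += 1
--     return "".join(out)
--
-- def _tokenize_program(text: str) -> List[str]:
--     text = _strip_comments(text)
--     tokens: List[str] = []
--     current: List[str] = []
--     in_string = False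
--     quote = ""
--     i = 0
--     while i < len(text):
--         ch = text[i]
--         if in_string:
--             current.append(ch)
--             if ch == "\\" and i + 1 < len(text):
--                 current.append(text[i + 1])
--                 i += 2
--                 continue
--             if ch == quote:
--                 in_string = False
--             i += 1
--             continue
--
--         if ch in ("'", '"'):
--             in_string = True
--             quote = ch
--             current.append(ch)
--             i += 1
--             continue
--
--         if ch in "{};\r\n":
--             token = "".join(current).strip()
--             if token:
--                 tokens.append(token)
--             current = []
--             if ch in "{}":
--                 tokens.append(ch)
--             i += 1
--             continue
--
--         current.append(ch)
--         i += 1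
--
--     token = "".join(current).strip()
--     if token:
--         tokens.append(token)
--     return tokens
-- ===== SOURCE B (Python) =====
-- def _tokenize_program(text):
--     # Single pass: comment stripping and tokenizing fused into one state machine.
--     tokens = []
--     current = []
--     in_string = False
--     quote = ""
--     i = 0
--     n = len(text)
--     while i < n:
--         ch = text[i]
--         if in_string:
--             current.append(ch)
--             if ch == "\\" and i + 1 < n:
--                 current.append(text[i + 1])
--                 i += 2
--                 continue
--             if ch == quote:
--                 in_string = False
--             i += 1
--             continue
--         if ch in ("'", '"'):
--             in_string = True
--             quote = ch
--             current.append(ch)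
--             i += 1
--             continue
--         if text.startswith("//", i) or ch == "#":
--             while i < n and text[i] not in "\r\n":
--                 i += 1
--             continue
--         if text.startswith("/*", i):
--             end = text.find("*/", i + 2)
--             if end == -1:
--                 break
--             i = end + 2
--             continue
--         if ch in "{};\r\n":
--             token = "".join(current).strip()
--             if token:
--                 tokens.append(token)
--             current = []
--             if ch in "{}":
--                 tokens.append(ch)
--             i += 1
--             continue
--         current.append(ch)
--         i += 1
--     token = "".join(current).strip()
--     if token:
--         tokens.append(token)
--     return tokens
-- ===== Notes on version B (the rewrite author's own statement) =====
-- stated objective: simpler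
-- what changed: A makes two passes (first builds a comment-stripped copy of the whole text, then re-tokenizes it re-parsing strings a second time); B fuses both into one single-pass state machine over the raw text, handling strings, comments and token flushing in the same loop.
import Mathlib
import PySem

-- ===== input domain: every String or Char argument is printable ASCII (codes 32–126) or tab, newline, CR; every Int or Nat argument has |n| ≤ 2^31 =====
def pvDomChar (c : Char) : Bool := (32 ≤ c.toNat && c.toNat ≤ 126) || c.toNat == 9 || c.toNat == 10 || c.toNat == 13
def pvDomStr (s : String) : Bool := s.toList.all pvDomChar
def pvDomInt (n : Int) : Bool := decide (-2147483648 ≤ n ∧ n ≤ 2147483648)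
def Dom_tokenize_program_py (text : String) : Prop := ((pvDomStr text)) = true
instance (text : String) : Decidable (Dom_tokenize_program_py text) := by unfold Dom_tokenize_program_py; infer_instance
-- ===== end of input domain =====

-- B fuses A's two passes (strip comments, then tokenize) into one single-pass state machine; objective: simpler decomposition, same output.

-- ===== PORT A =====

-- skip to the next \r or \n (Python: while i < len and text[i] not in "\r\n": i += 1)
def pvDropLine (l : List Char) : List Char := l.dropWhile (fun c => !(c == '\r' || c == '\n'))

-- text.find("*/", j) followed by i = end + 2: returns the suffix after the first "*/", none if absent
def pvFindClose : List Char → Option (List Char)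
  | [] => none
  | '*' :: '/' :: rest => some rest
  | _ :: rest => pvFindClose rest

theorem pvDropLine_lt (c : Char) (rest : List Char) (h : (!(c == '\r' || c == '\n')) = true) :
    (pvDropLine (c :: rest)).length < (c :: rest).length := by
  simp only [pvDropLine, List.dropWhile_cons, h, if_true]
  exact Nat.lt_succ_of_le (List.length_dropWhile_le _ _)

theorem pvFindClose_lt (l : List Char) (r : List Char) (h : pvFindClose l = some r) :
    r.length < l.length := by
  revert h
  fun_induction pvFindClose l with
  | case1 => intro h; simp at h
  | case2 rest => intro h; simp at h; subst h; simp
  | case3 a rest hne ih =>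
    intro h
    exact Nat.lt_trans (ih h) (by simp)

-- first pass of A (_strip_comments), recursion on the remaining characters
def pvStripAux (l : List Char) (inStr : Bool) (q : Char) : List Char :=
  match l with
  | [] => []
  | ch :: rest =>
    if inStr then
      match rest with
      | c2 :: rest2 =>
        if ch == '\\' then ch :: c2 :: pvStripAux rest2 true q
        else ch :: pvStripAux (c2 :: rest2) (!(ch == q)) q
      | [] => ch :: pvStripAux [] (!(ch == q)) q
    else
      if ch == '\'' || ch == '"' then ch :: pvStripAux rest true ch
      else if h1 : ch == '/' && rest.head? == some '/' then pvStripAux (pvDropLine (ch :: rest)) false q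
      else if h2 : ch == '#' then pvStripAux (pvDropLine (ch :: rest)) false q
      else if ch == '/' && rest.head? == some '*' then
        match h3 : pvFindClose rest.tail with
        | some r => pvStripAux r false q
        | none => []
      else ch :: pvStripAux rest false q
termination_by l.length
decreasing_by
  all_goals
    first
      | (apply pvDropLine_lt; simp at h1; rcases h1 with ⟨h, _⟩ | h <;> simp [h])
      | (apply pvDropLine_lt; simp_all)
      | (have hf := pvFindClose_lt _ _ h3
         have ht : rest.tail.length ≤ rest.length := by cases rest <;> simp
         simp; omega)
      | (have ht2 : rest.tail.length ≤ rest.length := by cases rest <;> simp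
         simp; omega)
      | (simp; try omega)

-- token = "".join(current).strip(); if token: tokens.append(token)
def pvFlushA (current : List Char) (tokens : List (List Char)) : List (List Char) :=
  let tok := PySem.Chars.strip current
  if tok.isEmpty then tokens else tokens ++ [tok]

-- second pass of A (the tokenize loop plus the final flush)
def pvTokenizeAux (l : List Char) (inStr : Bool) (q : Char) (current : List Char)
    (tokens : List (List Char)) : List (List Char) :=
  match l with
  | [] => pvFlushA current tokens
  | ch :: rest =>
    if inStr then
      if ch == '\\' && !rest.isEmpty then
        pvTokenizeAux rest.tail true q (current ++ [ch, rest.head!]) tokens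
      else pvTokenizeAux rest (!(ch == q)) q (current ++ [ch]) tokens
    else
      if ch == '\'' || ch == '"' then pvTokenizeAux rest true ch (current ++ [ch]) tokens
      else if ch == '{' || ch == '}' then
        pvTokenizeAux rest false q [] (pvFlushA current tokens ++ [[ch]])
      else if ch == ';' || ch == '\r' || ch == '\n' then
        pvTokenizeAux rest false q [] (pvFlushA current tokens)
      else pvTokenizeAux rest false q (current ++ [ch]) tokens
termination_by l.length
decreasing_by all_goals simp

def tokenize_program_py (text : String) : List String :=
  (pvTokenizeAux (pvStripAux text.toList false ' ') false ' ' [] []).map (fun t => String.ofList t)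

-- ===== PORT B =====

def pvFlushB (current : List Char) (tokens : List (List Char)) : List (List Char) :=
  let tok := PySem.Chars.strip current
  if tok.isEmpty then tokens else tokens ++ [tok]

-- B's single fused pass: comments handled and tokens emitted in the same loop
def pvTokAux (l : List Char) (inStr : Bool) (q : Char) (current : List Char)
    (tokens : List (List Char)) : List (List Char) :=
  match l with
  | [] => pvFlushB current tokens
  | ch :: rest =>
    if inStr then
      if ch == '\\' && !rest.isEmpty then
        pvTokAux rest.tail true q (current ++ [ch, rest.head!]) tokens
      else pvTokAux rest (!(ch == q)) q (current ++ [ch]) tokens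
    else
      if ch == '\'' || ch == '"' then pvTokAux rest true ch (current ++ [ch]) tokens
      else if h1 : (ch == '/' && rest.head? == some '/') || ch == '#' then
        pvTokAux (pvDropLine (ch :: rest)) false q current tokens
      else if ch == '/' && rest.head? == some '*' then
        match h3 : pvFindClose rest.tail with
        | some r => pvTokAux r false q current tokens
        | none => pvFlushB current tokens
      else if ch == '{' || ch == '}' then
        pvTokAux rest false q [] (pvFlushB current tokens ++ [[ch]])
      else if ch == ';' || ch == '\r' || ch == '\n' then
        pvTokAux rest false q [] (pvFlushB current tokens)
      else pvTokAux rest false q (current ++ [ch]) tokens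
termination_by l.length
decreasing_by
  all_goals
    first
      | (apply pvDropLine_lt; simp at h1; rcases h1 with ⟨h, _⟩ | h <;> simp [h])
      | (apply pvDropLine_lt; simp_all)
      | (have hf := pvFindClose_lt _ _ h3
         have ht : rest.tail.length ≤ rest.length := by cases rest <;> simp
         simp; omega)
      | (have ht2 : rest.tail.length ≤ rest.length := by cases rest <;> simp
         simp; omega)
      | (simp; try omega)

def tokenize_program_py_alt (text : String) : List String :=
  (pvTokAux text.toList false ' ' [] []).map (fun t => String.ofList t)

-- ===== PRECONDITION & SPEC =====
def Spec_tokenize_program_py (text : String) (out : List String) : Prop := out = tokenize_program_py_alt text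
instance (text : String) (out : List String) : Decidable (Spec_tokenize_program_py text out) := by unfold Spec_tokenize_program_py; infer_instance

-- ===== CLAIM (what is proved, stated in full; the proofs are below) =====
def Claim_equal_tokenize_program_py : Prop := ∀ (text : String), Dom_tokenize_program_py text → Spec_tokenize_program_py text (tokenize_program_py text)

-- ===== LEMMAS AND PROOFS =====

theorem pvFlush_eq (current : List Char) (tokens : List (List Char)) :
    pvFlushA current tokens = pvFlushB current tokens := rfl

theorem pv_main (l : List Char) (inStr : Bool) (q : Char) :
    ∀ current tokens,
      pvTokenizeAux (pvStripAux l inStr q) inStr q current tokens = pvTokAux l inStr q current tokens := by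
  fun_induction pvStripAux l inStr q
  all_goals (intro current tokens)
  case case1 => simp [pvTokenizeAux, pvTokAux, pvFlushA, pvFlushB]
  case case4 => simp [pvStripAux, pvTokenizeAux, pvTokAux, pvFlushA, pvFlushB]
  case case9 =>
    simp_all [pvTokenizeAux, pvTokAux, pvFlushA, pvFlushB]
    split <;> (split <;> first | rfl | simp_all)
  all_goals (rename_i ih; try (simp_all [pvTokenizeAux, pvTokAux, ih, pvFlush_eq]))
  all_goals (try (split <;> first | rfl | simp_all))
  all_goals (split_ifs <;> first | rfl | simp_all)

-- ===== VERDICT (by name: the statement is the Claim_ definition above) =====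
theorem tokenize_program_py_spec : Claim_equal_tokenize_program_py := by
  intro text _
  unfold Spec_tokenize_program_py tokenize_program_py tokenize_program_py_alt
  rw [pv_main]
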